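-- pv_equiv track=rewrite | github.com/dkippes/algoritmos-unq | Practicas/Practica 1 - estructuras de datos/6. UVA 11995 - Guess the data structure/11995.py | solve
-- ===== SOURCE A (Python) =====
-- from collections import deque
-- import heapq
--
-- def solve(ops):
--     stack = []
--     queue = deque()
--     pq = []  # max-heap con negativos
--
--     is_stack = True
--     is_queue = True
--     is_pq    = True
--
--     for operation, value in ops:
--         if operation == 1:
--             stack.append(value)
--             queue.append(value)
--             heapq.heappush(pq, -value) # Lo guarda como negativo porque saca el menor primero
--         else:
--             if is_stack:
--                 if not stack or stack[-1] != value: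
--                     is_stack = False
--                 else:
--                     stack.pop()
--
--             if is_queue:
--                 if not queue or queue[0] != value:
--                     is_queue = False
--                 else:
--                     queue.popleft()
--
--             if is_pq:
--                 if not pq or -pq[0] != value:
--                     is_pq = False
--                 else:
--                     heapq.heappop(pq) # Saca el menor de todos
--
--     count = sum([is_stack, is_queue, is_pq])
--     if count == 0:
--         return "impossible"
--     if count > 1:
--         return "not sure"
--     if is_stack: return "stack"
--     if is_queue: return "queue"
--     return "priority queue"
-- ===== SOURCE B (Python) =====
-- from collections import deque
--
-- def _ok_stack(ops):
--     st = []
--     for op, v in ops: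
--         if op == 1:
--             st.append(v)
--         else:
--             if not st or st[-1] != v:
--                 return False
--             st.pop()
--     return True
--
-- def _ok_queue(ops):
--     q = deque()
--     for op, v in ops:
--         if op == 1:
--             q.append(v)
--         else:
--             if not q or q[0] != v:
--                 return False
--             q.popleft()
--     return True
--
-- def _insort_desc(ms, v):
--     i = 0
--     while i < len(ms) and ms[i] > v:
--         i += 1
--     ms.insert(i, v)
--
-- def _ok_pq(ops):
--     ms = []  # descending sorted list; ms[0] is the maximum
--     for op, v in ops:
--         if op == 1:
--             _insort_desc(ms, v)
--         else:
--             if not ms or ms[0] != v: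
--                 return False
--             ms.pop(0)
--     return True
--
-- def solve(ops):
--     ops = list(ops)
--     is_stack = _ok_stack(ops)
--     is_queue = _ok_queue(ops)
--     is_pq = _ok_pq(ops)
--     count = sum([is_stack, is_queue, is_pq])
--     if count == 0:
--         return "impossible"
--     if count > 1:
--         return "not sure"
--     if is_stack: return "stack"
--     if is_queue: return "queue"
--     return "priority queue"
-- ===== Notes on version B (the rewrite author's own statement) =====
-- stated objective: simpler
-- what changed: Split A's single fused loop with three flags and three simultaneously-maintained containers into three independent early-returning replay passes (stack, queue, descending sorted list as priority queue), keeping A's final count/dispatch.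
import Mathlib
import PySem

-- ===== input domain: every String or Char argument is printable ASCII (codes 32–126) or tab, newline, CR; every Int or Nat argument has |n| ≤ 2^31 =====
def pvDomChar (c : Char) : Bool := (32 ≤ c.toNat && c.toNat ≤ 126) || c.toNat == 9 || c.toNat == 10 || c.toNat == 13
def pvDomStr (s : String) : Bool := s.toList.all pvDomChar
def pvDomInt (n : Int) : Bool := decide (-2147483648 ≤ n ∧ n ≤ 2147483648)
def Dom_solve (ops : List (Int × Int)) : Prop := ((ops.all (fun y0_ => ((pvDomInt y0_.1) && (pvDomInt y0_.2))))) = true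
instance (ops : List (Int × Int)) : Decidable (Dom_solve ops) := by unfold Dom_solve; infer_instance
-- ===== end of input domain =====

-- B replaces A's single fused loop (three flags, three containers maintained together) by three
-- independent early-returning replay passes plus A's final dispatch; objective: simpler.


-- ===== PORT A =====
-- sorted-ascending-list model of heapq (observationally exact here: only h[0] -- the minimum --
-- is read, heappush inserts, heappop removes the minimum; elements are plain ints)
def heapPush (h : List Int) (v : Int) : List Int :=
  match h with
  | [] => [v]
  | x :: xs => if v ≤ x then v :: x :: xs else x :: heapPush xs v

def solveStep (s : List Int × List Int × List Int × Bool × Bool × Bool) (p : Int × Int) :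
    List Int × List Int × List Int × Bool × Bool × Bool :=
  match s, p with
  | (stack, queue, pq, fs, fq, fp), (op, v) =>
    if op = 1 then
      (stack ++ [v], queue ++ [v], heapPush pq (-v), fs, fq, fp)
    else
      let (stack, fs) :=
        if fs then
          if stack = [] ∨ ¬ stack.getLast? = some v then (stack, false) else (stack.dropLast, fs)
        else (stack, fs)
      let (queue, fq) :=
        if fq then
          if queue = [] ∨ ¬ queue.head? = some v then (queue, false) else (queue.tail, fq)
        else (queue, fq)
      let (pq, fp) :=
        if fp then
          if pq = [] ∨ ¬ pq.head? = some (-v) then (pq, false) else (pq.tail, fp)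
        else (pq, fp)
      (stack, queue, pq, fs, fq, fp)

def solve (ops : List (Int × Int)) : String :=
  match ops.foldl solveStep ([], [], [], true, true, true) with
  | (_, _, _, fs, fq, fp) =>
    let count : Int := (cond fs 1 0) + (cond fq 1 0) + (cond fp 1 0)
    if count = 0 then "impossible"
    else if count > 1 then "not sure"
    else if fs then "stack"
    else if fq then "queue"
    else "priority queue"

-- ===== PORT B =====
def okStack : List (Int × Int) → List Int → Bool
  | [], _ => true
  | (op, v) :: rest, st =>
    if op = 1 then okStack rest (st ++ [v])
    else if st = [] ∨ ¬ st.getLast? = some v then false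
    else okStack rest st.dropLast

def okQueue : List (Int × Int) → List Int → Bool
  | [], _ => true
  | (op, v) :: rest, q =>
    if op = 1 then okQueue rest (q ++ [v])
    else if q = [] ∨ ¬ q.head? = some v then false
    else okQueue rest q.tail

-- insertion into a descending-sorted list (Source B's _insort_desc)
def insortDesc (ms : List Int) (v : Int) : List Int :=
  match ms with
  | [] => [v]
  | x :: xs => if x > v then x :: insortDesc xs v else v :: x :: xs

def okPQ : List (Int × Int) → List Int → Bool
  | [], _ => true
  | (op, v) :: rest, ms =>
    if op = 1 then okPQ rest (insortDesc ms v)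
    else if ms = [] ∨ ¬ ms.head? = some v then false
    else okPQ rest ms.tail

def solve_alt (ops : List (Int × Int)) : String :=
  let fs := okStack ops []
  let fq := okQueue ops []
  let fp := okPQ ops []
  let count : Int := (cond fs 1 0) + (cond fq 1 0) + (cond fp 1 0)
  if count = 0 then "impossible"
  else if count > 1 then "not sure"
  else if fs then "stack"
  else if fq then "queue"
  else "priority queue"

-- ===== PRECONDITION & SPEC =====
def Spec_solve (ops : List (Int × Int)) (out : String) : Prop := out = solve_alt ops
instance (ops : List (Int × Int)) (out : String) : Decidable (Spec_solve ops out) := by unfold Spec_solve; infer_instance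

-- ===== CLAIM (what is proved, stated in full; the proofs are below) =====
def Claim_equal_solve : Prop := ∀ (ops : List (Int × Int)), Dom_solve ops → Spec_solve ops (solve ops)

-- ===== LEMMAS AND PROOFS =====

theorem heapPush_negMap (ms : List Int) (v : Int) :
    heapPush (ms.map (fun x => -x)) (-v) = (insortDesc ms v).map (fun x => -x) := by
  induction ms with
  | nil => simp [heapPush, insortDesc]
  | cons x xs ih =>
    by_cases h : x > v
    · have : ¬ (-v ≤ -x) := by omega
      simp [heapPush, insortDesc, h, this, ih]
    · have : (-v ≤ -x) := by omega
      simp [heapPush, insortDesc, h, this]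

theorem negMap_eq_nil (ms : List Int) : (ms.map (fun x => -x) = []) ↔ ms = [] := by
  cases ms <;> simp

theorem negMap_head (ms : List Int) (v : Int) :
    ((ms.map (fun x => -x)).head? = some (-v)) ↔ ms.head? = some v := by
  cases ms with
  | nil => simp
  | cons x xs => constructor <;> (intro h; simp at h ⊢; omega)

theorem flags_foldl (ops : List (Int × Int)) :
    ∀ (stack queue ms : List Int) (fs fq fp : Bool),
      (ops.foldl solveStep (stack, queue, ms.map (fun x => -x), fs, fq, fp)).2.2.2 =
        (fs && okStack ops stack, fq && okQueue ops queue, fp && okPQ ops ms) := by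
  induction ops with
  | nil => intro stack queue ms fs fq fp; simp [okStack, okQueue, okPQ]
  | cons p rest ih =>
    intro stack queue ms fs fq fp
    obtain ⟨op, v⟩ := p
    by_cases hop : op = 1
    · simp only [List.foldl_cons, solveStep, hop, ite_true, heapPush_negMap]
      rw [ih]
      simp [okStack, okQueue, okPQ]
    · have hp' : ((ms.map (fun x => -x)) = [] ∨
          ¬ (ms.map (fun x => -x)).head? = some (-v)) ↔ (ms = [] ∨ ¬ ms.head? = some v) := by
        rw [negMap_eq_nil, negMap_head]
      have htail : (ms.map (fun x => -x)).tail = ms.tail.map (fun x => -x) := by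
        cases ms <;> simp
      simp only [List.foldl_cons, solveStep, if_neg hop, hp', htail]
      cases fs <;> cases fq <;> cases fp <;>
        by_cases hs : stack = [] ∨ ¬ stack.getLast? = some v <;>
        by_cases hq : queue = [] ∨ ¬ queue.head? = some v <;>
        by_cases hp : ms = [] ∨ ¬ ms.head? = some v <;>
        simp only [hs, hq, hp, ite_true, ite_false, Bool.false_eq_true] <;>
        rw [ih] <;>
        simp [okStack, okQueue, okPQ, hop, hs, hq, hp]

-- ===== VERDICT (by name: the statement is the Claim_ definition above) =====
theorem solve_spec : Claim_equal_solve := by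
  intro ops _
  unfold Spec_solve solve solve_alt
  have h := flags_foldl ops [] [] [] true true true
  simp only [List.map_nil] at h
  rcases hfold : ops.foldl solveStep ([], [], [], true, true, true) with ⟨st, q, pq, fs, fq, fp⟩
  rw [hfold] at h
  simp only at h
  simp only [Bool.true_and] at h
  have hfs : fs = okStack ops [] := congrArg (fun t => t.1) h
  have hfq : fq = okQueue ops [] := congrArg (fun t => t.2.1) h
  have hfp : fp = okPQ ops [] := congrArg (fun t => t.2.2) h
  rw [hfs, hfq, hfp]
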